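-- pv_equiv track=rewrite | github.com/fyxc/LSH---Movie-Recommend | LSHrec.py | lsh
-- ===== SOURCE A (Python) =====
-- def lsh(hash_matrix):
--     candidate = []
--     for i in range(5):
--         for u1 in range(len(hash_matrix)):
--             for u2 in range(u1+1, len(hash_matrix)):
--                 if hash_matrix[u1][i*4:(i+1)*4] == hash_matrix[u2][i*4:(i+1)*4]:
--                     candidate.append([u1,u2])
--     return list(set(tuple(i) for i in candidate))
-- ===== SOURCE B (Python) =====
-- def lsh(hash_matrix):
--     # LSH candidate pairs: bucket users per band by the 4-char band signature,
--     # then pair each user with the later users in its bucket.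
--     n = len(hash_matrix)
--     out = []
--     seen = set()
--     for i in range(5):
--         buckets = {}
--         for u in range(n):
--             buckets.setdefault(hash_matrix[u][i*4:(i+1)*4], []).append(u)
--         for u1 in range(n):
--             for u2 in buckets[hash_matrix[u1][i*4:(i+1)*4]]:
--                 if u2 > u1 and (u1, u2) not in seen:
--                     seen.add((u1, u2))
--                     out.append((u1, u2))
--     return out
-- ===== Notes on version B (the rewrite author's own statement) =====
-- stated objective: faster
-- what changed: Replaces the O(n^2)-per-band all-pairs signature comparison by hashing each user into a per-band bucket keyed by its 4-char band slice and pairing each user only with the later users in its own bucket, with a seen-set replacing the final list(set(...)) dedup.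
import Mathlib
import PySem

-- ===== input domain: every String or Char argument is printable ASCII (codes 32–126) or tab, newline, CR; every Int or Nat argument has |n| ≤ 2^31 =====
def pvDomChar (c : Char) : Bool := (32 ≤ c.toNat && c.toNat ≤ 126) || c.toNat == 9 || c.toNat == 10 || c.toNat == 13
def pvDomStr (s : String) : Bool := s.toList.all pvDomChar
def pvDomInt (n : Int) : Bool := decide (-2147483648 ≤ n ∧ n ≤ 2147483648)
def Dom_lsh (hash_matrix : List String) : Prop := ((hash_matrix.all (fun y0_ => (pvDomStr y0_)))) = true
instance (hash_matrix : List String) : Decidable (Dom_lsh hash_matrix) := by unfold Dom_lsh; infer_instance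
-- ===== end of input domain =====

-- B replaces A's all-pairs O(n^2)-per-band comparison by bucketing users per band on the
-- 4-char band slice and pairing each user with the later users in its bucket (dedup via a
-- seen-set). The final Python `list(set(candidate))` iterates a set in hash order; outputs
-- are compared as sets, and both ports keep first occurrences in candidate order (PySem.Set).

-- shared helper: the expression hash_matrix[u][i*4:(i+1)*4], written inline in both Pythons
def bandKey (hash_matrix : List String) (i u : Int) : String :=
  PySem.Str.slice (PySem.List.pyGetD hash_matrix u "") (some (i*4)) (some ((i+1)*4))

-- ===== PORT A =====
def lsh (hash_matrix : List String) : List (Int × Int) :=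
  let candidate : List (Int × Int) :=
    (PySem.List.pyRange 0 5 1).foldl (fun acc i =>
      (PySem.List.pyRange 0 (PySem.List.len hash_matrix) 1).foldl (fun acc u1 =>
        (PySem.List.pyRange (u1 + 1) (PySem.List.len hash_matrix) 1).foldl (fun acc u2 =>
          if bandKey hash_matrix i u1 == bandKey hash_matrix i u2 then
            acc ++ [(u1, u2)]
          else acc) acc) acc) []
  PySem.Set.ofList candidate

-- ===== PORT B =====
def lsh_alt (hash_matrix : List String) : List (Int × Int) :=
  let n : Int := PySem.List.len hash_matrix
  let res :=
    (PySem.List.pyRange 0 5 1).foldl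
      (fun (st : List (Int × Int) × PySem.Set (Int × Int)) i =>
        -- buckets.setdefault(k, []).append(u)  ==  buckets[k] = buckets.get(k, []) + [u]
        let buckets : PySem.Dict String (List Int) :=
          (PySem.List.pyRange 0 n 1).foldl
            (fun d u => d.modify (bandKey hash_matrix i u) [] (fun l => l ++ [u]))
            PySem.Dict.empty
        (PySem.List.pyRange 0 n 1).foldl
          (fun st u1 =>
            -- buckets[...]: u1 itself was inserted under its own key in the first loop,
            -- so the KeyError branch is unreachable; getD [] is exact here
            (buckets.getD (bandKey hash_matrix i u1) []).foldl
              (fun (st : List (Int × Int) × PySem.Set (Int × Int)) u2 =>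
                if u1 < u2 && !(st.2.contains (u1, u2)) then
                  (st.1 ++ [(u1, u2)], st.2.add (u1, u2))
                else st) st) st)
      ([], PySem.Set.empty)
  res.1

-- ===== PRECONDITION & SPEC =====
def Spec_lsh (hash_matrix : List String) (out : List (Int × Int)) : Prop := out = lsh_alt hash_matrix
instance (hash_matrix : List String) (out : List (Int × Int)) : Decidable (Spec_lsh hash_matrix out) := by unfold Spec_lsh; infer_instance

-- ===== CLAIM (what is proved, stated in full; the proofs are below) =====
def Claim_equal_lsh : Prop := ∀ (hash_matrix : List String), Dom_lsh hash_matrix → Spec_lsh hash_matrix (lsh hash_matrix)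

-- ===== LEMMAS AND PROOFS =====

lemma strBeqComm (a b : String) : (a == b) = (b == a) := by
  by_cases h : a = b <;> simp [h, Ne.symm]

def seenStep (os : List (Int × Int) × PySem.Set (Int × Int)) (p : Int × Int) :
    List (Int × Int) × PySem.Set (Int × Int) :=
  if os.2.contains p then os else (os.1 ++ [p], os.2.add p)

lemma foldl_seenStep (l : List (Int × Int)) (s : PySem.Set (Int × Int)) :
    l.foldl seenStep (s, s) = (PySem.Set.update s l, PySem.Set.update s l) := by
  induction l generalizing s with
  | nil => rfl
  | cons p l ih =>
      have h1 : seenStep (s, s) p = (PySem.Set.add s p, PySem.Set.add s p) := by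
        simp only [seenStep, PySem.Set.add]
        split_ifs <;> rfl
      simp only [List.foldl_cons, h1, ih, PySem.Set.update, List.foldl_cons]

lemma buckets_getD (hash_matrix : List String) (i : Int) (l : List Int)
    (d : PySem.Dict String (List Int)) (k : String) :
    (l.foldl (fun d u => d.modify (bandKey hash_matrix i u) [] (fun l => l ++ [u])) d).getD k []
      = d.getD k [] ++ l.filter (fun u => bandKey hash_matrix i u == k) := by
  induction l generalizing d with
  | nil => simp
  | cons u l ih =>
      simp only [List.foldl_cons, ih, List.filter_cons]
      by_cases h : bandKey hash_matrix i u = k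
      · simp [h]
      · simp [PySem.Dict.getD_modify, h, Ne.symm h]

-- the guarded inner fold over a bucket = seenStep-fold over the later same-key partners
lemma guard_foldl (u1 : Int) (l : List Int)
    (st : List (Int × Int) × PySem.Set (Int × Int)) :
    l.foldl (fun (st : List (Int × Int) × PySem.Set (Int × Int)) u2 =>
        if u1 < u2 && !(st.2.contains (u1, u2)) then
          (st.1 ++ [(u1, u2)], st.2.add (u1, u2))
        else st) st
      = ((l.filter (fun u2 => decide (u1 < u2))).map (fun u2 => (u1, u2))).foldl seenStep st := by
  induction l generalizing st with
  | nil => rfl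
  | cons u2 l ih =>
      simp only [List.foldl_cons, List.filter_cons]
      by_cases h : u1 < u2
      · simp only [h, decide_true, if_true, Bool.true_and, List.map_cons, List.foldl_cons]
        have h2 : (if (!st.2.contains (u1, u2)) = true then
            (st.1 ++ [(u1, u2)], st.2.add (u1, u2)) else st) = seenStep st (u1, u2) := by
          simp only [seenStep]
          cases hc : st.2.contains (u1, u2) <;> simp
        rw [h2, ih]
      · simp only [h, decide_false, Bool.false_and, if_neg Bool.false_ne_true]
        rw [ih]

lemma filter_lt_pyRange (u1 n : Int) (h0 : 0 ≤ u1) :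
    (PySem.List.pyRange 0 n 1).filter (fun u2 => decide (u1 < u2))
      = PySem.List.pyRange (u1 + 1) n 1 := by
  by_cases hn : u1 + 1 ≤ n
  · rw [PySem.List.pyRange_one_append 0 (u1 + 1) n (by omega) hn, List.filter_append]
    have h2 : (PySem.List.pyRange 0 (u1 + 1) 1).filter (fun u2 => decide (u1 < u2)) = [] := by
      rw [List.filter_eq_nil_iff]
      intro a ha
      rw [PySem.List.mem_pyRange_one] at ha
      simp only [decide_eq_true_eq]
      omega
    have h3 : (PySem.List.pyRange (u1 + 1) n 1).filter (fun u2 => decide (u1 < u2))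
        = PySem.List.pyRange (u1 + 1) n 1 := by
      rw [List.filter_eq_self]
      intro a ha
      rw [PySem.List.mem_pyRange_one] at ha
      simp only [decide_eq_true_eq]
      omega
    rw [h2, h3, List.nil_append]
  · rw [show PySem.List.pyRange (u1 + 1) n 1 = [] from PySem.List.pyRange_one_eq_nil (by omega),
      List.filter_eq_nil_iff]
    intro a ha
    rw [PySem.List.mem_pyRange_one] at ha
    simp only [decide_eq_true_eq]
    omega

lemma foldl_flatMap_seen (l : List Int) (f : Int → List (Int × Int))
    (st : List (Int × Int) × PySem.Set (Int × Int)) :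
    l.foldl (fun st u => (f u).foldl seenStep st) st = (l.flatMap f).foldl seenStep st := by
  induction l generalizing st with
  | nil => rfl
  | cons u l ih => simp only [List.foldl_cons, List.flatMap_cons, List.foldl_append, ih]

-- the per-band list of matching pairs, in A's emission order
def bandList (hash_matrix : List String) (i : Int) : List (Int × Int) :=
  (PySem.List.pyRange 0 (PySem.List.len hash_matrix) 1).flatMap (fun u1 =>
    ((PySem.List.pyRange (u1 + 1) (PySem.List.len hash_matrix) 1).filter
        (fun u2 => bandKey hash_matrix i u1 == bandKey hash_matrix i u2)).map
      (fun u2 => (u1, u2)))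

-- B's band loop: buckets + guarded bucket scan = seenStep-fold over bandList
lemma band_loop (hash_matrix : List String) (i : Int)
    (st : List (Int × Int) × PySem.Set (Int × Int)) :
    (PySem.List.pyRange 0 (PySem.List.len hash_matrix) 1).foldl
      (fun st u1 =>
        ((((PySem.List.pyRange 0 (PySem.List.len hash_matrix) 1).foldl
            (fun d u => d.modify (bandKey hash_matrix i u) [] (fun l => l ++ [u]))
            PySem.Dict.empty).getD (bandKey hash_matrix i u1) [])).foldl
          (fun (st : List (Int × Int) × PySem.Set (Int × Int)) u2 =>
            if u1 < u2 && !(st.2.contains (u1, u2)) then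
              (st.1 ++ [(u1, u2)], st.2.add (u1, u2))
            else st) st) st
    = (bandList hash_matrix i).foldl seenStep st := by
  rw [PySem.List.foldl_congr_mem _ _
      (fun st u1 =>
        (((PySem.List.pyRange (u1 + 1) (PySem.List.len hash_matrix) 1).filter
            (fun u2 => bandKey hash_matrix i u1 == bandKey hash_matrix i u2)).map
          (fun u2 => (u1, u2))).foldl seenStep st) _ ?_]
  · exact foldl_flatMap_seen _ _ st
  · intro st u1 hm
    rw [PySem.List.mem_pyRange_one] at hm
    rw [guard_foldl, buckets_getD, PySem.Dict.getD_empty, List.nil_append,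
      List.filter_filter]
    congr 1
    rw [← filter_lt_pyRange u1 (PySem.List.len hash_matrix) hm.1, List.filter_filter]
    congr 1
    exact List.filter_congr (fun a _ => by
      rw [Bool.and_comm, strBeqComm (bandKey hash_matrix i a) (bandKey hash_matrix i u1)])

-- A's result is the dedup (first occurrences) of the concatenated band lists
lemma lsh_eq_ofList_flatMap (hash_matrix : List String) :
    lsh hash_matrix =
      PySem.Set.ofList ((PySem.List.pyRange 0 5 1).flatMap (bandList hash_matrix)) := by
  unfold lsh
  dsimp only
  congr 1
  rw [PySem.List.foldl_congr_mem _ _ (fun acc i => acc ++ bandList hash_matrix i) _ ?_,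
    PySem.List.foldl_append_eq_flatMap, List.nil_append]
  intro acc i _
  rw [PySem.List.foldl_congr_mem _ _ (fun acc u1 => acc ++
      ((PySem.List.pyRange (u1 + 1) (PySem.List.len hash_matrix) 1).filter
        (fun u2 => bandKey hash_matrix i u1 == bandKey hash_matrix i u2)).map
      (fun u2 => (u1, u2))) _ ?_,
    PySem.List.foldl_append_eq_flatMap]
  · rfl
  · intro acc u1 _
    exact PySem.List.foldl_append_if _ _ _ _

-- the outer band loop of B threads the seen-set/out pair through all bands
lemma outer_loop (hash_matrix : List String) (l : List Int)
    (s : PySem.Set (Int × Int)) :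
    l.foldl (fun st i => (bandList hash_matrix i).foldl seenStep st) (s, s)
      = (PySem.Set.update s (l.flatMap (bandList hash_matrix)),
         PySem.Set.update s (l.flatMap (bandList hash_matrix))) := by
  induction l generalizing s with
  | nil => rfl
  | cons i l ih =>
      simp only [List.foldl_cons, foldl_seenStep, ih, List.flatMap_cons]
      simp [PySem.Set.update, List.foldl_append]

-- B's result is the same dedup of the same concatenation
lemma lsh_alt_eq (hash_matrix : List String) :
    lsh_alt hash_matrix =
      PySem.Set.ofList ((PySem.List.pyRange 0 5 1).flatMap (bandList hash_matrix)) := by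
  unfold lsh_alt
  dsimp only
  rw [PySem.List.foldl_congr_mem _ _
      (fun (st : List (Int × Int) × PySem.Set (Int × Int)) i =>
        (bandList hash_matrix i).foldl seenStep st) _ ?_]
  · have := outer_loop hash_matrix (PySem.List.pyRange 0 5 1) PySem.Set.empty
    rw [show (PySem.Set.empty : PySem.Set (Int × Int)) = [] from rfl] at this ⊢
    rw [this, PySem.Set.update_nil_left]
  · intro st i _
    exact band_loop hash_matrix i st

-- ===== VERDICT (by name: the statement is the Claim_ definition above) =====
theorem lsh_spec : Claim_equal_lsh := by
  intro hash_matrix _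
  unfold Spec_lsh
  rw [lsh_eq_ofList_flatMap, lsh_alt_eq]
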